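-- pv_equiv track=rewrite | github.com/kupl/Graphick | Heap_Abstracton/heap_merge_strategies.py | strategy_keywords
-- ===== SOURCE A (Python) =====
-- def strategy_keywords(type_heaps_map):
--   # keywords = ['clinit', 'byte[]']
--   # keywords = ['clinit', 'java.lang.String']
--   # keywords = ['clinit', 'java.lang.StringBuilder', 'char[]', 'int[]', '<class', 'java.lang.Object[]/']
--   # keywords = ['clinit', 'java.lang.StringBuilder', 'char[]', 'int[]']
--   # keywords = ['clinit', 'java.lang.StringBuilder', 'char[]', 'int[]', 'getContents', 'java.lang.StringBuffer', 'byte[]', '$UnicodeBlock/', 'java.io.File', 'java.lang.String', 'long[]']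
--   keywords = ['clinit', 'java.lang.StringBuilder']
--   print ('Strategy: Keywords OR')
--   print ('Keywords: '),
--   print (keywords)
--   # keywords = ['clinit', 'java.lang.String']
--   rst = {}
--
--   for typ in type_heaps_map.keys():
--
--     keyword_reps = {}
--     same_type_heaps = type_heaps_map[typ]
--     if 'java.lang.Class' == typ:
--       for heap in same_type_heaps:
--         rst[heap] = '<class java.security.cert.CertPathValidatorException>'
--       continue
--
--     for heap in same_type_heaps:
--       is_found = -1
--       for keyword in keywords:
--         if keyword in heap:
--           is_found = keywords.index(keyword)
--           break
--
--       if is_found == -1: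
--         rst[heap] = heap
--       else:
--         if keywords[is_found] not in keyword_reps.keys():
--           keyword_reps[keywords[is_found]] = heap
--         rst[heap] = keyword_reps[keywords[is_found]]
--   return rst
-- ===== SOURCE B (Python) =====
-- def strategy_keywords(type_heaps_map):
--   keywords = ['clinit', 'java.lang.StringBuilder']
--   print ('Strategy: Keywords OR')
--   print ('Keywords: '),
--   print (keywords)
--   rst = {}
--
--   def first_kw(heap):
--     return next((k for k in keywords if k in heap), None)
--
--   for typ, heaps in type_heaps_map.items():
--     if typ == 'java.lang.Class':
--       for heap in heaps:
--         rst[heap] = '<class java.security.cert.CertPathValidatorException>'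
--       continue
--     # pass 1: for each keyword, the first heap of this type whose first match is that keyword
--     index = {}
--     for heap in heaps:
--       k = first_kw(heap)
--       if k is not None and k not in index:
--         index[k] = heap
--     # pass 2: assign every heap its representative
--     for heap in heaps:
--       k = first_kw(heap)
--       rst[heap] = heap if k is None else index.get(k, heap)
--   return rst
-- ===== Notes on version B (the rewrite author's own statement) =====
-- stated objective: alternative
-- what changed: B drops A's incremental keyword_reps dict and keywords.index/int-flag bookkeeping and instead makes two passes per type: pass 1 builds an index mapping each first-matching keyword to the first heap matching it, pass 2 assigns every heap index.get(its first keyword), keeping the java.lang.Class override and the prints unchanged.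
import Mathlib
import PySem

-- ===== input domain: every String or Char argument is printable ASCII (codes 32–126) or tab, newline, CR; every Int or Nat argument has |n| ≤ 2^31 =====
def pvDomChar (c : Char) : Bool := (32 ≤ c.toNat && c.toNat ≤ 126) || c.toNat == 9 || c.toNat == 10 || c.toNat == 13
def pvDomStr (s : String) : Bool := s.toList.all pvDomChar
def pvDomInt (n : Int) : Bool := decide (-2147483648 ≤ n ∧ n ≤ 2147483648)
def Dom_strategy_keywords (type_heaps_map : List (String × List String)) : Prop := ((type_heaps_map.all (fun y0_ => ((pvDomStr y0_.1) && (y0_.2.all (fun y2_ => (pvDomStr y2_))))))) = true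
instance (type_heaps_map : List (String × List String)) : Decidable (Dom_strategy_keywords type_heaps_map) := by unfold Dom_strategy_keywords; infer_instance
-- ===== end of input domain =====

-- B replaces A's incremental keyword_reps/keywords.index/int-flag bookkeeping by two passes per type:
-- pass 1 builds an index (first keyword -> first heap whose first match is that keyword), pass 2 assigns
-- each heap index.get(its first keyword); the equivalence is about the RETURN value only — both Pythons
-- additionally print the same three lines.

-- ===== PORT A =====
def pvKeywords : List String := ["clinit", "java.lang.StringBuilder"]

-- the 'for keyword in keywords: if keyword in heap: is_found = keywords.index(keyword); break' loop
-- (list.index's ValueError branch is unreachable here: the scanned keyword is a member of pvKeywords)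
def pvScan (heap : String) : List String → Int
  | [] => -1
  | k :: rest =>
      if PySem.Str.isIn k heap then
        match PySem.List.index? pvKeywords k with
        | some i => (i : Int)
        | none => -1
      else pvScan heap rest

-- one iteration of A's inner 'for heap in same_type_heaps' loop; state = (keyword_reps, rst)
-- (the keyword_reps[kw] lookup after the conditional insert cannot miss, so getD's default is unreachable)
def pvAInner (st : PySem.Dict String String × PySem.Dict String String) (heap : String) :
    PySem.Dict String String × PySem.Dict String String :=
  let is_found := pvScan heap pvKeywords
  if is_found == -1 then
    (st.1, st.2.insert heap heap)
  else
    let kw := (PySem.List.pyGet? pvKeywords is_found).getD ""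
    let reps := if st.1.contains kw then st.1 else st.1.insert kw heap
    (reps, st.2.insert heap (reps.getD kw heap))

def strategy_keywords (type_heaps_map : List (String × List String)) : List (String × String) :=
  (type_heaps_map.foldl (fun (rst : PySem.Dict String String) p =>
      if p.1 == "java.lang.Class" then
        p.2.foldl (fun r h => r.insert h "<class java.security.cert.CertPathValidatorException>") rst
      else
        (p.2.foldl pvAInner (PySem.Dict.empty, rst)).2)
    PySem.Dict.empty).items

-- ===== PORT B =====
-- first_kw(heap) = next((k for k in keywords if k in heap), None)
def pvFirstKw (heap : String) : Option String :=
  pvKeywords.find? (fun k => PySem.Str.isIn k heap)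

-- pass 1: 'if k is not None and k not in index: index[k] = heap'
def pvIndex (heaps : List String) : PySem.Dict String String :=
  heaps.foldl (fun d h =>
    match pvFirstKw h with
    | none => d
    | some k => if d.contains k then d else d.insert k h) PySem.Dict.empty

-- pass 2 value: 'heap if k is None else index.get(k, heap)'
def pvRepB (index : PySem.Dict String String) (heap : String) : String :=
  match pvFirstKw heap with
  | none => heap
  | some k => index.getD k heap

def strategy_keywords_alt (type_heaps_map : List (String × List String)) : List (String × String) :=
  (type_heaps_map.foldl (fun (rst : PySem.Dict String String) p =>
      if p.1 == "java.lang.Class" then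
        p.2.foldl (fun r h => r.insert h "<class java.security.cert.CertPathValidatorException>") rst
      else
        let index := pvIndex p.2
        p.2.foldl (fun r h => r.insert h (pvRepB index h)) rst)
    PySem.Dict.empty).items

-- ===== PRECONDITION & SPEC =====
def Spec_strategy_keywords (type_heaps_map : List (String × List String)) (out : List (String × String)) : Prop := out = strategy_keywords_alt type_heaps_map
instance (type_heaps_map : List (String × List String)) (out : List (String × String)) : Decidable (Spec_strategy_keywords type_heaps_map out) := by unfold Spec_strategy_keywords; infer_instance

-- ===== CLAIM (what is proved, stated in full; the proofs are below) =====
def Claim_equal_strategy_keywords : Prop := ∀ (type_heaps_map : List (String × List String)), Dom_strategy_keywords type_heaps_map → Spec_strategy_keywords type_heaps_map (strategy_keywords type_heaps_map)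

-- ===== LEMMAS AND PROOFS =====

-- A's step, expressed through pvFirstKw
lemma pvAInner_eq (st : PySem.Dict String String × PySem.Dict String String) (heap : String) :
    pvAInner st heap =
      match pvFirstKw heap with
      | none => (st.1, st.2.insert heap heap)
      | some kw =>
          let reps := if st.1.contains kw then st.1 else st.1.insert kw heap
          (reps, st.2.insert heap (reps.getD kw heap)) := by
  cases h1 : PySem.Str.isIn "clinit" heap <;>
    cases h2 : PySem.Str.isIn "java.lang.StringBuilder" heap <;>
      simp only [pvAInner, pvScan, pvFirstKw, pvKeywords, h1, h2, List.find?, if_false,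
        Bool.false_eq_true, if_pos] <;> rfl

lemma pvAInner_none (st : PySem.Dict String String × PySem.Dict String String) (heap : String)
    (hfk : pvFirstKw heap = none) : pvAInner st heap = (st.1, st.2.insert heap heap) := by
  rw [pvAInner_eq, hfk]

lemma pvAInner_some (st : PySem.Dict String String × PySem.Dict String String) (heap kw : String)
    (hfk : pvFirstKw heap = some kw) :
    pvAInner st heap =
      (if st.1.contains kw then st.1 else st.1.insert kw heap,
       st.2.insert heap ((if st.1.contains kw then st.1 else st.1.insert kw heap).getD kw heap)) := by
  rw [pvAInner_eq, hfk]

-- proof-side characterisation of the representative: first heap sharing the first matching keyword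
def pvRep (heaps : List String) (heap : String) : String :=
  match pvFirstKw heap with
  | none => heap
  | some kw => (heaps.find? (fun h2 => pvFirstKw h2 == some kw)).getD heap

lemma pvRep_none (heaps : List String) (heap : String) (hfk : pvFirstKw heap = none) :
    pvRep heaps heap = heap := by
  rw [pvRep, hfk]

lemma pvRep_some (heaps : List String) (heap kw : String) (hfk : pvFirstKw heap = some kw) :
    pvRep heaps heap = (heaps.find? (fun h2 => pvFirstKw h2 == some kw)).getD heap := by
  rw [pvRep, hfk]

-- A's keyword_reps after a prefix of heaps coincides with B's pass-1 index of that prefix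
lemma pvIndex_get? (pre : List String) (kw : String) :
    (pvIndex pre).get? kw = pre.find? (fun h2 => pvFirstKw h2 == some kw) := by
  suffices H : ∀ (d : PySem.Dict String String),
      (pre.foldl (fun d h =>
        match pvFirstKw h with
        | none => d
        | some k => if d.contains k then d else d.insert k h) d).get? kw
        = (d.get? kw).or (pre.find? (fun h2 => pvFirstKw h2 == some kw)) by
    simpa [pvIndex] using H PySem.Dict.empty
  induction pre with
  | nil => simp
  | cons h rest ih =>
    intro d
    simp only [List.foldl_cons]
    cases hfk : pvFirstKw h with
    | none =>
      have hfc : List.find? (fun h2 => pvFirstKw h2 == some kw) (h :: rest)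
          = List.find? (fun h2 => pvFirstKw h2 == some kw) rest := by simp [hfk]
      simp only [hfk]
      rw [hfc, ih]
    | some k =>
      by_cases hk : k = kw
      · subst hk
        have hfc : List.find? (fun h2 => pvFirstKw h2 == some k) (h :: rest) = some h := by
          simp [hfk]
        simp only [hfk]
        rw [hfc]
        by_cases hc : d.contains k = true
        · have hv : (d.get? k).isSome := by rw [← PySem.Dict.contains_eq_isSome_get?]; exact hc
          rcases Option.isSome_iff_exists.1 hv with ⟨v, hveq⟩
          rw [if_pos hc, ih, hveq]; rfl
        · have hcf : d.contains k = false := by simpa using hc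
          have hn : d.get? k = none := (PySem.Dict.get?_eq_none_iff_contains _ _).2 hcf
          rw [if_neg hc, ih, hn, PySem.Dict.get?_insert_self]; rfl
      · have hfc : List.find? (fun h2 => pvFirstKw h2 == some kw) (h :: rest)
            = List.find? (fun h2 => pvFirstKw h2 == some kw) rest := by simp [hfk, hk]
        simp only [hfk]
        rw [hfc]
        by_cases hc : d.contains k = true
        · rw [if_pos hc, ih]
        · rw [if_neg hc, ih, PySem.Dict.get?_insert_of_ne (hne := Ne.symm hk)]

lemma pvIndex_append (pre : List String) (h : String) :
    pvIndex (pre ++ [h]) =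
      match pvFirstKw h with
      | none => pvIndex pre
      | some kw => if (pvIndex pre).contains kw then pvIndex pre else (pvIndex pre).insert kw h := by
  simp [pvIndex, List.foldl_append]

-- the per-type inner loops agree: A's fold with (keyword_reps, rst) state versus B's direct inserts
lemma pvInner_agree (suf : List String) : ∀ (pre : List String) (rst : PySem.Dict String String),
    (suf.foldl pvAInner (pvIndex pre, rst)).2
      = suf.foldl (fun r h => r.insert h (pvRep (pre ++ suf) h)) rst := by
  induction suf with
  | nil => intro pre rst; rfl
  | cons h suf' ih =>
    intro pre rst
    have hsplit : pre ++ h :: suf' = (pre ++ [h]) ++ suf' := by simp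
    rw [List.foldl_cons, List.foldl_cons]
    cases hfk : pvFirstKw h with
    | none =>
      have hr : pvRep (pre ++ h :: suf') h = h := pvRep_none _ _ hfk
      have hpre : pvIndex (pre ++ [h]) = pvIndex pre := by
        rw [pvIndex_append]; simp only [hfk]
      rw [pvAInner_none _ _ hfk, hr, hsplit, ← hpre, ih]
    | some kw =>
      have hph : (pvFirstKw h == some kw) = true := by simp [hfk]
      have hfind : (pre ++ h :: suf').find? (fun h2 => pvFirstKw h2 == some kw)
          = ((pre.find? (fun h2 => pvFirstKw h2 == some kw)).or (some h)) := by
        rw [List.find?_append]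
        cases hp : pre.find? (fun h2 => pvFirstKw h2 == some kw) <;> simp [hph]
      by_cases hc : (pvIndex pre).contains kw = true
      · -- representative already fixed by the prefix
        have hs : ((pvIndex pre).get? kw).isSome := by
          rw [← PySem.Dict.contains_eq_isSome_get?]; exact hc
        rcases Option.isSome_iff_exists.1 hs with ⟨v, hv⟩
        have hfp : pre.find? (fun h2 => pvFirstKw h2 == some kw) = some v := by
          rw [← pvIndex_get?]; exact hv
        have hr : pvRep (pre ++ h :: suf') h = v := by
          rw [pvRep_some _ _ _ hfk, hfind, hfp]; rfl
        have hgd : (pvIndex pre).getD kw h = v := PySem.Dict.getD_of_get?_eq_some _ _ hv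
        have hpre : pvIndex (pre ++ [h]) = pvIndex pre := by
          rw [pvIndex_append]; simp only [hfk]; rw [if_pos hc]
        rw [pvAInner_some _ _ _ hfk, if_pos hc, hgd, hr, hsplit, ← hpre, ih]
      · -- h itself becomes the representative
        have hcf : (pvIndex pre).contains kw = false := by
          cases hb : (pvIndex pre).contains kw
          · rfl
          · exact absurd hb hc
        have hfp : pre.find? (fun h2 => pvFirstKw h2 == some kw) = none := by
          rw [← pvIndex_get?, (PySem.Dict.get?_eq_none_iff_contains _ _).2 hcf]
        have hr : pvRep (pre ++ h :: suf') h = h := by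
          rw [pvRep_some _ _ _ hfk, hfind, hfp]; rfl
        have hgd : ((pvIndex pre).insert kw h).getD kw h = h := by
          rw [PySem.Dict.getD_eq_get?_getD, PySem.Dict.get?_insert_self]; rfl
        have hpre : pvIndex (pre ++ [h]) = (pvIndex pre).insert kw h := by
          rw [pvIndex_append]; simp only [hfk]; rw [if_neg hc]
        rw [pvAInner_some _ _ _ hfk, if_neg hc, hgd, hr, hsplit, ← hpre, ih]

lemma pvRepB_eq (heaps : List String) (h : String) :
    pvRepB (pvIndex heaps) h = pvRep heaps h := by
  cases hfk : pvFirstKw h with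
  | none => rw [pvRepB, hfk, pvRep_none _ _ hfk]
  | some k =>
    have hb : pvRepB (pvIndex heaps) h = (pvIndex heaps).getD k h := by rw [pvRepB, hfk]
    rw [hb, PySem.Dict.getD_eq_get?_getD, pvIndex_get?, pvRep_some _ _ _ hfk]

-- ===== VERDICT (by name: the statement is the Claim_ definition above) =====
theorem strategy_keywords_spec : Claim_equal_strategy_keywords := by
  intro tm _
  unfold Spec_strategy_keywords
  unfold strategy_keywords strategy_keywords_alt
  congr 1
  apply PySem.List.foldl_congr_mem
  intro rst p _
  by_cases hcl : (p.1 == "java.lang.Class") = true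
  · simp [hcl]
  · have h0 : (PySem.Dict.empty : PySem.Dict String String) = pvIndex [] := rfl
    simp only [hcl, Bool.false_eq_true, if_false]
    rw [h0, pvInner_agree p.2 [] rst, List.nil_append]
    show _ = p.2.foldl (fun r h => r.insert h (pvRepB (pvIndex p.2) h)) rst
    exact (PySem.List.foldl_congr_mem p.2
      (fun (r : PySem.Dict String String) h => r.insert h (pvRepB (pvIndex p.2) h))
      (fun r h => r.insert h (pvRep p.2 h)) rst (fun acc x _ => by simp only [pvRepB_eq])).symm
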